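-- pv_equiv track=rewrite | github.com/caojiangxia/CCKS2017 | NER/OnehotGuiyihua.py | suf
-- ===== SOURCE A (Python) =====
-- def suf(pos,str):
--     res=""
--     while(pos<len(str)):
--         if(str[pos]>='a' and str[pos]<='z'):
--             res=res+str[pos]
--         else: return res;
--         pos+=1
--     return res
-- ===== SOURCE B (Python) =====
-- def suf(pos, str):
--     s = str[pos:]
--     for i, c in enumerate(s):
--         if not ('a' <= c <= 'z'):
--             return s[:i]
--     return s
-- ===== Notes on version B (the rewrite author's own statement) =====
-- stated objective: faster
-- what changed: B slices the scan window once (str[pos:]) and returns the prefix up to the first non-lowercase character, instead of A's char-by-char index walk over the original string with repeated string concatenation.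
-- intended difference: For negative pos in range whose whole tail str[pos:] is lowercase and whose first character str[0] is lowercase, A's index wraps past the end and re-scans from the front (e.g. suf(-1,'ab')='bab'), while B returns just the lowercase tail 'b', the intended maximal lowercase run starting at pos. — e.g. on suf(-1, "ab"): A returns "bab", B returns "b"
import Mathlib
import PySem

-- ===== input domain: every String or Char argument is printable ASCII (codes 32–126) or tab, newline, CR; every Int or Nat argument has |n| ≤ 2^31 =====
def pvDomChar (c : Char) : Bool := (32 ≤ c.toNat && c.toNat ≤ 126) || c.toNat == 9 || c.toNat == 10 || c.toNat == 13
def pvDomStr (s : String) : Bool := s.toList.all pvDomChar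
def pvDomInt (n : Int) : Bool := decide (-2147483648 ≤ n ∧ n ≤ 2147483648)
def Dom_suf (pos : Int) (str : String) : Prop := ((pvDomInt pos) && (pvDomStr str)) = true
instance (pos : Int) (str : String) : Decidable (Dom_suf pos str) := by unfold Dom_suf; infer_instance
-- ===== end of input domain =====

-- B slices the window str[pos:] once and cuts at the first non-lowercase character, instead of A's
-- char-by-char index walk with string concatenation; B does not reproduce A's negative-index wraparound
-- past the end of the string (see D_suf below).

-- ===== PORT A =====
def pvLow (c : Char) : Bool := decide ('a' ≤ c) && decide (c ≤ 'z')

def sufLoop (cs : List Char) : Nat → Int → List Char → List Char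
  | 0, _, res => res      -- fuel, only for structural termination; never reached from suf
  | fuel + 1, pos, res =>
    if pos < (cs.length : Int) then
      match PySem.List.pyGet? cs pos with
      | none => res      -- Python raises IndexError here (pos < -len); excluded by Pre_suf
      | some c => if pvLow c then sufLoop cs fuel (pos + 1) (res ++ [c]) else res
    else res

def suf (pos : Int) (str : String) : String :=
  String.ofList (sufLoop str.toList (((str.toList.length : Int) - pos).toNat + 1) pos [])

-- ===== PORT B =====
-- for i, c in enumerate(s): if not ('a' <= c <= 'z'): return s[:i]  /  return s
def sufAltLoop (s : List Char) (rest : List Char) (i : Nat) : List Char :=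
  match rest with
  | [] => s
  | c :: cs => if !(pvLow c) then s.take i else sufAltLoop s cs (i + 1)

def suf_alt (pos : Int) (str : String) : String :=
  let s := PySem.List.slice str.toList (some pos) none
  String.ofList (sufAltLoop s s 0)

-- ===== PRECONDITION & SPEC =====
-- Pre_ excludes exactly the inputs where A raises IndexError: pos < -len(str) (str[pos] out of range).
def Pre_suf (pos : Int) (str : String) : Prop := -(str.toList.length : Int) ≤ pos
instance (pos : Int) (str : String) : Decidable (Pre_suf pos str) := by unfold Pre_suf; infer_instance
def pvWitness_suf : Int × String := (0, "ab")

-- For negative pos in range whose whole tail str[pos:] is lowercase and whose first character str[0]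
-- is lowercase, A's index wraps past the end and re-scans from the front (suf(-1,'ab')='bab'), while B
-- returns just the lowercase tail 'b' — the intended maximal lowercase run starting at pos.
def D_suf (pos : Int) (str : String) : Prop :=
  pos < 0 ∧ -(str.toList.length : Int) ≤ pos ∧
  (str.toList.drop ((str.toList.length : Int) + pos).toNat).all pvLow = true ∧
  (str.toList.take 1).all pvLow = true
instance (pos : Int) (str : String) : Decidable (D_suf pos str) := by unfold D_suf; infer_instance

def Spec_suf (pos : Int) (str : String) (out : String) : Prop := ¬ D_suf pos str → out = suf_alt pos str
instance (pos : Int) (str : String) (out : String) : Decidable (Spec_suf pos str out) := by unfold Spec_suf; infer_instance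

def pvDiffWitness_suf : Int × String := (-1, "ab")
def pvDiffWitnessOut_suf : String × String := ("bab", "b")

-- ===== CLAIM (what is proved, stated in full; the proofs are below) =====
def Claim_unchanged_suf : Prop := ∀ (pos : Int) (str : String), Dom_suf pos str → Pre_suf pos str → Spec_suf pos str (suf pos str)
def Claim_changed_suf : Prop := Dom_suf (pvDiffWitness_suf.1) (pvDiffWitness_suf.2) ∧ Pre_suf (pvDiffWitness_suf.1) (pvDiffWitness_suf.2) ∧ D_suf (pvDiffWitness_suf.1) (pvDiffWitness_suf.2) ∧ suf (pvDiffWitness_suf.1) (pvDiffWitness_suf.2) = pvDiffWitnessOut_suf.1 ∧ suf_alt (pvDiffWitness_suf.1) (pvDiffWitness_suf.2) = pvDiffWitnessOut_suf.2 ∧ pvDiffWitnessOut_suf.1 ≠ pvDiffWitnessOut_suf.2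
def Claim_exact_suf : Prop := ∀ (pos : Int) (str : String), Dom_suf pos str → Pre_suf pos str → D_suf pos str → suf pos str ≠ suf_alt pos str

-- ===== LEMMAS AND PROOFS =====

theorem sufLoop_stop (cs : List Char) (fuel : Nat) (p : Int) (res : List Char)
    (h : (cs.length : Int) ≤ p) : sufLoop cs fuel p res = res := by
  cases fuel with
  | zero => rfl
  | succ fuel => unfold sufLoop; rw [if_neg (by omega)]

theorem sufLoop_nonneg (cs : List Char) :
    ∀ (fuel p : Nat) (res : List Char), cs.length - p < fuel →
      sufLoop cs fuel (p : Int) res = res ++ (cs.drop p).takeWhile pvLow := by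
  intro fuel
  induction fuel with
  | zero => omega
  | succ fuel ih =>
    intro p res h
    by_cases hp : p < cs.length
    · unfold sufLoop
      rw [if_pos (by exact_mod_cast hp), PySem.List.pyGet?_natCast,
          List.getElem?_eq_getElem hp]
      by_cases hl : pvLow cs[p]
      · simp only [hl, if_true]
        have hc : ((p : Int) + 1) = ((p + 1 : Nat) : Int) := by push_cast; ring
        rw [hc, ih (p + 1) (res ++ [cs[p]]) (by omega),
            List.drop_eq_getElem_cons hp, List.takeWhile_cons, if_pos hl]
        simp
      · simp only [hl]
        rw [List.drop_eq_getElem_cons hp, List.takeWhile_cons, if_neg hl]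
        simp
    · rw [sufLoop_stop cs _ p res (by exact_mod_cast Nat.le_of_not_lt hp),
          List.drop_eq_nil_iff.mpr (by omega)]
      simp

theorem sufLoop_neg (cs : List Char) :
    ∀ (k : Nat), 1 ≤ k → k ≤ cs.length → ∀ (res : List Char) (fuel : Nat), cs.length + k < fuel →
      sufLoop cs fuel (-(k : Int)) res = res ++ ((cs.drop (cs.length - k)) ++ cs).takeWhile pvLow := by
  intro k
  induction k with
  | zero => omega
  | succ k ih =>
    intro _ h2 res fuel hfuel
    obtain ⟨f, rfl⟩ : ∃ f, fuel = f + 1 := ⟨fuel - 1, by omega⟩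
    have hidx : cs.length - (k + 1) < cs.length := by omega
    unfold sufLoop
    rw [if_pos (by push_cast; omega),
        PySem.List.pyGet?_neg_natCast cs (k + 1) (by omega) h2,
        List.getElem?_eq_getElem hidx]
    have he : cs.length - (k + 1) + 1 = cs.length - k := by omega
    have hdrop : cs.drop (cs.length - (k + 1)) =
        cs[cs.length - (k + 1)] :: cs.drop (cs.length - k) := by
      rw [List.drop_eq_getElem_cons hidx, he]
    by_cases hl : pvLow cs[cs.length - (k + 1)]
    · simp only [hl, if_true]
      rw [hdrop, List.cons_append, List.takeWhile_cons, if_pos hl]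
      rcases Nat.eq_zero_or_pos k with hk0 | hk1
      · subst hk0
        have h0 : (-((1 : Nat) : Int) + 1) = ((0 : Nat) : Int) := by norm_num
        rw [h0, sufLoop_nonneg cs f 0 _ (by omega)]
        simp
      · have hstep : (-((k + 1 : Nat) : Int) + 1) = -((k : Nat) : Int) := by push_cast; ring
        rw [hstep, ih hk1 (by omega) _ f (by omega)]
        simp
    · simp only [hl]
      rw [hdrop, List.cons_append, List.takeWhile_cons, if_neg hl]
      simp

theorem sufAltLoop_eq (s : List Char) :
    ∀ (rest : List Char) (i : Nat), s.drop i = rest →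
      sufAltLoop s rest i = s.take i ++ rest.takeWhile pvLow := by
  intro rest
  induction rest with
  | nil =>
    intro i h
    unfold sufAltLoop
    rw [List.take_of_length_le (List.drop_eq_nil_iff.mp h)]
    simp
  | cons c cs ih =>
    intro i h
    unfold sufAltLoop
    by_cases hl : pvLow c
    · rw [if_neg (by simp [hl])]
      have h' : s.drop (i + 1) = cs := by rw [← List.tail_drop, h]; rfl
      have hgi : s[i]? = some c := by
        have : (s.drop i)[0]? = some c := by rw [h]; rfl
        simpa [List.getElem?_drop] using this
      rw [ih (i + 1) h', List.take_add_one, hgi, List.takeWhile_cons, if_pos hl]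
      simp
    · rw [if_pos (by simp [hl]), List.takeWhile_cons, if_neg hl]
      simp

-- B's value: the leading pvLow-run of the sliced window.
theorem suf_alt_eq (pos : Int) (str : String) :
    suf_alt pos str = String.ofList ((PySem.List.slice str.toList (some pos) none).takeWhile pvLow) := by
  show String.ofList (sufAltLoop (PySem.List.slice str.toList (some pos) none)
    (PySem.List.slice str.toList (some pos) none) 0) = _
  rw [sufAltLoop_eq (PySem.List.slice str.toList (some pos) none)
    (PySem.List.slice str.toList (some pos) none) 0 (by simp)]
  simp

theorem takeWhile_append_all {l₁ l₂ : List Char} (hall : l₁.all pvLow = true) :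
    (l₁ ++ l₂).takeWhile pvLow = l₁ ++ l₂.takeWhile pvLow := by
  rw [List.takeWhile_append,
      if_pos (by rw [List.takeWhile_eq_self_iff.mpr (List.all_eq_true.mp hall)])]

theorem takeWhile_append_not_all {l₁ l₂ : List Char} (hall : ¬ l₁.all pvLow = true) :
    (l₁ ++ l₂).takeWhile pvLow = l₁.takeWhile pvLow := by
  rw [List.takeWhile_append, if_neg]
  intro hlen
  exact hall (List.all_eq_true.mpr (List.takeWhile_eq_self_iff.mp
    ((List.takeWhile_prefix pvLow).eq_of_length hlen)))

-- ===== VERDICT (by name: the statement is the Claim_ definition above) =====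
theorem suf_spec : Claim_unchanged_suf := by
  unfold Claim_unchanged_suf
  intro pos str _hdom hpre hnd
  unfold Pre_suf at hpre
  unfold suf
  rw [suf_alt_eq]
  by_cases hge : 0 ≤ pos
  · -- nonnegative pos: both are the run of the suffix str[pos:]
    obtain ⟨p, rfl⟩ : ∃ p : Nat, pos = (p : Int) := ⟨pos.toNat, (Int.toNat_of_nonneg hge).symm⟩
    rw [sufLoop_nonneg str.toList _ p [] (by omega),
        PySem.List.slice_from str.toList hge]
    simp
  · -- negative pos in range: A scans the tail, then (outside D_) stops at or before str[0]
    obtain ⟨k, hk⟩ : ∃ k : Nat, pos = -(k : Int) := ⟨(-pos).toNat, by omega⟩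
    have hk1 : 1 ≤ k := by omega
    have hk2 : k ≤ str.toList.length := by omega
    subst hk
    rw [sufLoop_neg str.toList k hk1 hk2 [] _ (by omega),
        PySem.List.slice_from_neg_natCast str.toList k (by omega) ]
    simp only [List.nil_append]
    by_cases hall : (str.toList.drop (str.toList.length - k)).all pvLow = true
    · -- tail all lowercase; ¬D_ forces str[0] not lowercase, both stop at the whole tail
      have hhead : ¬ (str.toList.take 1).all pvLow = true := by
        intro htake
        exact hnd ⟨by omega, by omega, by
          have hT : ((str.toList.length : Int) + -(k : Int)).toNat = str.toList.length - k := by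
            omega
          rw [hT]; exact hall, htake⟩
      rw [takeWhile_append_all hall]
      have h1 : str.toList.takeWhile pvLow = [] := by
        rcases hcs' : str.toList with _ | ⟨c0, rest⟩
        · rfl
        · have hc0 : ¬ pvLow c0 = true := by
            intro hc; exact hhead (by rw [hcs']; simp [hc])
          rw [List.takeWhile_cons, if_neg hc0]
      rw [h1, List.takeWhile_eq_self_iff.mpr (List.all_eq_true.mp hall), List.append_nil]
    · -- A stops inside the tail: same run as B
      rw [takeWhile_append_not_all hall]

theorem suf_changed : Claim_changed_suf := by unfold Claim_changed_suf; decide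

theorem suf_tight : Claim_exact_suf := by
  unfold Claim_exact_suf
  intro pos str _hdom hpre hd
  obtain ⟨hneg, _, hall, hhead⟩ := hd
  unfold Pre_suf at hpre
  obtain ⟨k, hk⟩ : ∃ k : Nat, pos = -(k : Int) := ⟨(-pos).toNat, by omega⟩
  have hk1 : 1 ≤ k := by omega
  have hk2 : k ≤ str.toList.length := by omega
  have hall' : (str.toList.drop (str.toList.length - k)).all pvLow = true := by
    have hT : ((str.toList.length : Int) + pos).toNat = str.toList.length - k := by omega
    rwa [hT] at hall
  subst hk
  unfold suf
  rw [suf_alt_eq, sufLoop_neg str.toList k hk1 hk2 [] _ (by omega),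
      PySem.List.slice_from_neg_natCast str.toList k (by omega) , List.nil_append,
      takeWhile_append_all hall']
  intro heq
  have hlist := congrArg String.toList heq
  rw [String.toList_ofList, String.toList_ofList,
      List.takeWhile_eq_self_iff.mpr (List.all_eq_true.mp hall')] at hlist
  have hlen := congrArg List.length hlist
  rw [List.length_append] at hlen
  rcases hcs' : str.toList with _ | ⟨c0, rest⟩
  · rw [hcs'] at hk2; simp at hk2; omega
  · have hc0 : pvLow c0 = true := by
      rw [hcs'] at hhead; simpa using hhead
    rw [hcs', List.takeWhile_cons, if_pos hc0] at hlen
    simp at hlen
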